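-- pv_equiv track=rewrite | github.com/Deepak-Laksman/DSA-Implementations-Python | DynamicProgramming/MinimumNumberOfInsertionsToMakeItPalindrome.py | minimumInsertions
-- ===== SOURCE A (Python) =====
-- def minimumInsertions(text, pattern, n, m):
--     dp = [[0 for i in range(m + 1)] for j in range(n + 1)]
--     for i in range(1, n + 1):
--         for j in range(1, m + 1):
--             if text[i - 1] == pattern[j - 1]:
--                 dp[i][j] = 1 + dp[i - 1][j - 1]
--             else:
--                 dp[i][j] = max(dp[i - 1][j], dp[i][j - 1])
--     return n - dp[n][m]
-- ===== SOURCE B (Python) =====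
-- def minimumInsertions(text, pattern, n, m):
--     # top-down memoized recursion on the LCS recurrence (dict keyed by (i, j))
--     memo = {}
--     def lcs(i, j):
--         if i == 0 or j == 0:
--             return 0
--         v = memo.get((i, j))
--         if v is not None:
--             return v
--         if text[i - 1] == pattern[j - 1]:
--             res = 1 + lcs(i - 1, j - 1)
--         else:
--             res = max(lcs(i - 1, j), lcs(i, j - 1))
--         memo[(i, j)] = res
--         return res
--     return n - lcs(n, m)
-- ===== Notes on version B (the rewrite author's own statement) =====
-- stated objective: alternative
-- what changed: Replaces A's bottom-up fill of a preallocated (n+1)x(m+1) table by top-down memoized recursion: an inner lcs(i,j) helper descending from (n,m) with results cached in a dict keyed by (i,j).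
import Mathlib
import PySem

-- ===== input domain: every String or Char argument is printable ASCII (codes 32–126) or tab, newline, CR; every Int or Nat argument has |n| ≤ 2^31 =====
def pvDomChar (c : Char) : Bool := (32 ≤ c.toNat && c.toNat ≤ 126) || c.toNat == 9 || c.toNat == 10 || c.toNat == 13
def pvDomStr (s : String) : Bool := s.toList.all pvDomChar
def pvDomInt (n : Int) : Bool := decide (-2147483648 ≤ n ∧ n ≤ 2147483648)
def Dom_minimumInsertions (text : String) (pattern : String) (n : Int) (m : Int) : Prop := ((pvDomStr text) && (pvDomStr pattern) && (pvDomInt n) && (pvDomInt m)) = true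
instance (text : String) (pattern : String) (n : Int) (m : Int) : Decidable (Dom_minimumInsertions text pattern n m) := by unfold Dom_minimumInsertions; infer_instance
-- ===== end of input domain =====

-- B replaces A's bottom-up fill of the (n+1)×(m+1) table by top-down memoized recursion (dict keyed by (i,j)); return value proved equal on Pre_.

-- ===== PORT A =====
-- total forms of Python's dp[i][j] read / write; exact whenever the indices are in range, which they are at every use under Pre_
def pvTblGet (dp : List (List Int)) (i j : Int) : Int :=
  PySem.List.pyGetD (PySem.List.pyGetD dp i []) j 0

def pvTblSet (dp : List (List Int)) (i j : Int) (v : Int) : List (List Int) :=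
  PySem.List.pySetD dp i (PySem.List.pySetD (PySem.List.pyGetD dp i []) j v)

-- dp = [[0]*(m+1) row for each of n+1 rows]; two nested for-loops fill it in place; return n - dp[n][m]
def minimumInsertions (text : String) (pattern : String) (n : Int) (m : Int) : Int :=
  n - pvTblGet
    ((PySem.List.pyRange 1 (n + 1) 1).foldl (fun dp i =>
      (PySem.List.pyRange 1 (m + 1) 1).foldl (fun dp j =>
        if PySem.Str.pyGet? text (i - 1) == PySem.Str.pyGet? pattern (j - 1) then
          pvTblSet dp i j (1 + pvTblGet dp (i - 1) (j - 1))
        else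
          pvTblSet dp i j (max (pvTblGet dp (i - 1) j) (pvTblGet dp i (j - 1)))) dp)
      ((PySem.List.pyRange 0 (n + 1) 1).map (fun _ =>
        (PySem.List.pyRange 0 (m + 1) 1).map (fun _ => (0 : Int)))))
    n m

-- ===== PORT B =====
-- Python B's inner `lcs(i, j)` with the memo dict threaded through; the Nat fuel only makes the
-- recursion structurally terminating (each call decreases i+j by 1, so fuel = (n+m).toNat is never
-- exhausted on the admitted inputs) — it is a totality guard, not part of the algorithm.
def pvLcsMemo (text pattern : String) (fuel : Nat) (i j : Int)
    (memo : PySem.Dict (Int × Int) Int) : Int × PySem.Dict (Int × Int) Int :=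
  if i == 0 || j == 0 then (0, memo)
  else
    match fuel with
    | 0 => (0, memo)  -- unreachable fuel guard
    | fuel + 1 =>
      match PySem.Dict.get? memo (i, j) with
      | some v => (v, memo)
      | none =>
        let r :=
          if PySem.Str.pyGet? text (i - 1) == PySem.Str.pyGet? pattern (j - 1) then
            let d := pvLcsMemo text pattern fuel (i - 1) (j - 1) memo
            (1 + d.1, d.2)
          else
            let a := pvLcsMemo text pattern fuel (i - 1) j memo
            let b := pvLcsMemo text pattern fuel i (j - 1) a.2
            (max a.1 b.1, b.2)
        (r.1, PySem.Dict.insert r.2 (i, j) r.1)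

-- memo = {}; return n - lcs(n, m)
def minimumInsertions_alt (text : String) (pattern : String) (n : Int) (m : Int) : Int :=
  n - (pvLcsMemo text pattern (n + m).toNat n m PySem.Dict.empty).1

-- ===== PRECONDITION & SPEC =====
-- Pre_ excludes exactly the inputs where Python A raises IndexError: negative n or m, and
-- n > len(text) or m > len(pattern) while both loops actually run (n ≥ 1 and m ≥ 1).
def Pre_minimumInsertions (text : String) (pattern : String) (n : Int) (m : Int) : Prop :=
  0 ≤ n ∧ 0 ≤ m ∧ (m = 0 ∨ n ≤ PySem.Str.len text) ∧ (n = 0 ∨ m ≤ PySem.Str.len pattern)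
instance (text : String) (pattern : String) (n : Int) (m : Int) : Decidable (Pre_minimumInsertions text pattern n m) := by unfold Pre_minimumInsertions; infer_instance

def pvWitness_minimumInsertions : String × String × Int × Int := ("ab", "b", 2, 1)

def Spec_minimumInsertions (text : String) (pattern : String) (n : Int) (m : Int) (out : Int) : Prop := out = minimumInsertions_alt text pattern n m
instance (text : String) (pattern : String) (n : Int) (m : Int) (out : Int) : Decidable (Spec_minimumInsertions text pattern n m out) := by unfold Spec_minimumInsertions; infer_instance

-- ===== CLAIM (what is proved, stated in full; the proofs are below) =====
def Claim_equal_minimumInsertions : Prop := ∀ (text : String) (pattern : String) (n : Int) (m : Int), Dom_minimumInsertions text pattern n m → Pre_minimumInsertions text pattern n m → Spec_minimumInsertions text pattern n m (minimumInsertions text pattern n m)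

-- ===== LEMMAS AND PROOFS =====

-- LCS-length recurrence both ports are proved equal to: pvLcs t p i j = LCS length of t[:i] and p[:j]
def pvLcs (t p : List Char) : Nat → Nat → Int
  | 0, _ => 0
  | _ + 1, 0 => 0
  | i + 1, j + 1 =>
    if t[i]? == p[j]? then 1 + pvLcs t p i j
    else max (pvLcs t p i (j + 1)) (pvLcs t p (i + 1) j)
termination_by i j => i + j

theorem pvLcs_zero_right (t p : List Char) (i : Nat) : pvLcs t p i 0 = 0 := by
  cases i <;> simp [pvLcs]

theorem pvLcs_zero_left (t p : List Char) (j : Nat) : pvLcs t p 0 j = 0 := by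
  simp [pvLcs]

theorem pvLcs_succ_succ (t p : List Char) (i j : Nat) :
    pvLcs t p (i + 1) (j + 1) =
      if t[i]? == p[j]? then 1 + pvLcs t p i j
      else max (pvLcs t p i (j + 1)) (pvLcs t p (i + 1) j) := by
  rw [pvLcs]

-- A's table after rows < i are done and row i is done through column j; untouched cells are 0
def pvTab (t p : List Char) (N M i j : Nat) : List (List Int) :=
  (List.range (N + 1)).map (fun r =>
    (List.range (M + 1)).map (fun c =>
      if r < i ∨ (r = i ∧ c ≤ j) then pvLcs t p r c else 0))

theorem pvTab_get (t p : List Char) (N M i j r c : Nat) (hr : r ≤ N) (hc : c ≤ M)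
    (h : r < i ∨ (r = i ∧ c ≤ j)) :
    pvTblGet (pvTab t p N M i j) (r : Int) (c : Int) = pvLcs t p r c := by
  unfold pvTblGet pvTab
  simp only [PySem.List.pyGetD_natCast]
  rw [PySem.List.getD_map_range _ _ _ _ (by omega),
      PySem.List.getD_map_range _ _ _ _ (by omega), if_pos h]

theorem pvTab_set (t p : List Char) (N M i j : Nat) (hi : i + 1 ≤ N) (_hj : j + 1 ≤ M) (v : Int)
    (hv : v = pvLcs t p (i + 1) (j + 1)) :
    pvTblSet (pvTab t p N M (i + 1) j) ((i : Int) + 1) ((j : Int) + 1) v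
      = pvTab t p N M (i + 1) (j + 1) := by
  unfold pvTblSet pvTab
  rw [show ((i : Int) + 1) = ((i + 1 : Nat) : Int) by push_cast; ring,
      show ((j : Int) + 1) = ((j + 1 : Nat) : Int) by push_cast; ring]
  simp only [PySem.List.pyGetD_natCast, PySem.List.pySetD_natCast]
  rw [PySem.List.getD_map_range _ _ _ _ (by omega)]
  apply List.ext_getElem
  · simp
  · intro r h1 h2
    simp only [List.length_set, List.length_map, List.length_range] at h1 h2
    rw [List.getElem_set]
    simp only [List.getElem_map, List.getElem_range]
    by_cases hr : i + 1 = r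
    · subst hr
      rw [if_pos rfl]
      apply List.ext_getElem
      · simp
      · intro c h3 h4
        simp only [List.length_set, List.length_map, List.length_range] at h3 h4
        rw [List.getElem_set]
        simp only [List.getElem_map, List.getElem_range,
          lt_self_iff_false, false_or, true_and]
        by_cases hcj : j + 1 = c
        · subst hcj
          rw [if_pos rfl, if_pos (le_refl _)]
          exact hv
        · rw [if_neg hcj]
          split_ifs with h5 h6 <;> first | rfl | omega
    · rw [if_neg hr]
      apply List.map_congr_left
      intro c hc
      rw [List.mem_range] at hc
      split_ifs with h5 h6 <;> first | rfl | omega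

theorem pvTab_row_init (t p : List Char) (N M i : Nat) :
    pvTab t p N M (i + 1) 0 = pvTab t p N M i M := by
  unfold pvTab
  apply List.map_congr_left
  intro r _
  apply List.map_congr_left
  intro c hc
  rw [List.mem_range] at hc
  split_ifs with h1 h2 <;> try rfl
  · have hrc : r = i + 1 ∧ c = 0 := by omega
    rw [hrc.1, hrc.2, pvLcs_zero_right]
  · exfalso; omega

theorem a_init (t p : List Char) (N M : Nat) :
    ((PySem.List.pyRange 0 ((N:Int) + 1) 1).map (fun _ =>
      (PySem.List.pyRange 0 ((M:Int) + 1) 1).map (fun _ => (0 : Int))))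
    = pvTab t p N M 0 M := by
  simp only [show ((N:Int) + 1) = ((N + 1 : Nat) : Int) by push_cast; ring,
             show ((M:Int) + 1) = ((M + 1 : Nat) : Int) by push_cast; ring,
             PySem.List.pyRange_zero_natCast, List.map_map]
  unfold pvTab
  apply List.map_congr_left
  intro r _
  simp only [Function.comp_apply, Function.comp_def]
  apply List.map_congr_left
  intro c hc
  rw [List.mem_range] at hc
  split_ifs with h
  · have hr : r = 0 := by omega
    subst hr
    simp [pvLcs]
  · rfl

theorem a_inner (text pattern : String) (N M i : Nat) (hi : i + 1 ≤ N) :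
    ∀ j, j ≤ M →
    (PySem.List.pyRange 1 ((j:Int) + 1) 1).foldl
      (fun dp jj =>
        if PySem.Str.pyGet? text (i:Int) == PySem.Str.pyGet? pattern (jj - 1) then
          pvTblSet dp ((i:Int) + 1) jj (1 + pvTblGet dp (i:Int) (jj - 1))
        else
          pvTblSet dp ((i:Int) + 1) jj (max (pvTblGet dp (i:Int) jj) (pvTblGet dp ((i:Int) + 1) (jj - 1))))
      (pvTab text.toList pattern.toList N M (i + 1) 0)
    = pvTab text.toList pattern.toList N M (i + 1) j := by
  intro j
  induction j with
  | zero =>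
    intro _
    rw [show ((0:Nat):Int) + 1 = 1 by norm_num, PySem.List.pyRange_one_eq_nil (le_refl 1)]
    rfl
  | succ j ih =>
    intro hj
    rw [show (((j+1:Nat)):Int) + 1 = ((j:Int) + 1) + 1 by push_cast; ring,
        PySem.List.pyRange_one_succ_right (a := 1) (b := (j:Int) + 1) (by omega),
        List.foldl_append, ih (by omega)]
    simp only [List.foldl_cons, List.foldl_nil, add_sub_cancel_right]
    have g1 : pvTblGet (pvTab text.toList pattern.toList N M (i+1) j) (i:Int) (j:Int)
        = pvLcs text.toList pattern.toList i j :=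
      pvTab_get _ _ N M (i+1) j i j (by omega) (by omega) (by omega)
    have g2 : pvTblGet (pvTab text.toList pattern.toList N M (i+1) j) (i:Int) ((j:Int)+1)
        = pvLcs text.toList pattern.toList i (j+1) := by
      rw [show ((j:Int) + 1) = ((j+1:Nat):Int) by push_cast; ring]
      exact pvTab_get _ _ N M (i+1) j i (j+1) (by omega) (by omega) (by omega)
    have g3 : pvTblGet (pvTab text.toList pattern.toList N M (i+1) j) ((i:Int)+1) (j:Int)
        = pvLcs text.toList pattern.toList (i+1) j := by
      rw [show ((i:Int) + 1) = ((i+1:Nat):Int) by push_cast; ring]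
      exact pvTab_get _ _ N M (i+1) j (i+1) j (by omega) (by omega) (Or.inr ⟨rfl, le_refl j⟩)
    rw [g1, g2, g3]
    simp only [PySem.Str.pyGet?_natCast]
    by_cases hch : text.toList[i]? == pattern.toList[j]?
    · rw [if_pos hch]
      exact pvTab_set _ _ N M i j (by omega) (by omega) _ (by rw [pvLcs_succ_succ, if_pos hch])
    · rw [if_neg hch]
      exact pvTab_set _ _ N M i j (by omega) (by omega) _ (by rw [pvLcs_succ_succ, if_neg hch])

theorem a_outer (text pattern : String) (N M : Nat) :
    ∀ i, i ≤ N →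
    (PySem.List.pyRange 1 ((i:Int) + 1) 1).foldl
      (fun dp ii =>
        (PySem.List.pyRange 1 ((M:Int) + 1) 1).foldl
          (fun dp jj =>
            if PySem.Str.pyGet? text (ii - 1) == PySem.Str.pyGet? pattern (jj - 1) then
              pvTblSet dp ii jj (1 + pvTblGet dp (ii - 1) (jj - 1))
            else
              pvTblSet dp ii jj (max (pvTblGet dp (ii - 1) jj) (pvTblGet dp ii (jj - 1)))) dp)
      (pvTab text.toList pattern.toList N M 0 M)
    = pvTab text.toList pattern.toList N M i M := by
  intro i
  induction i with
  | zero =>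
    intro _
    rw [show ((0:Nat):Int) + 1 = 1 by norm_num, PySem.List.pyRange_one_eq_nil (le_refl 1)]
    rfl
  | succ i ih =>
    intro hi
    rw [show (((i+1:Nat)):Int) + 1 = ((i:Int) + 1) + 1 by push_cast; ring,
        PySem.List.pyRange_one_succ_right (a := 1) (b := (i:Int) + 1) (by omega),
        List.foldl_append, ih (by omega)]
    simp only [List.foldl_cons, List.foldl_nil, add_sub_cancel_right]
    rw [← pvTab_row_init text.toList pattern.toList N M i]
    exact a_inner text pattern N M i (by omega) M (le_refl M)

theorem a_main (text pattern : String) (N M : Nat) :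
    minimumInsertions text pattern (N : Int) (M : Int)
      = (N : Int) - pvLcs text.toList pattern.toList N M := by
  unfold minimumInsertions
  rw [a_init text.toList pattern.toList N M, a_outer text pattern N M N (le_refl N),
      pvTab_get text.toList pattern.toList N M N M N M (le_refl N) (le_refl M)
        (Or.inr ⟨rfl, le_refl M⟩)]

-- ===== B-side lemmas: the memo always stores correct LCS values =====
def pvMemoOK (t p : List Char) (memo : PySem.Dict (Int × Int) Int) : Prop :=
  ∀ kv ∈ memo.items, kv.2 = pvLcs t p kv.1.1.toNat kv.1.2.toNat

theorem pvLcsMemo_correct (text pattern : String) :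
    ∀ (fuel : Nat) (i j : Int) (memo : PySem.Dict (Int × Int) Int),
      0 ≤ i → 0 ≤ j → i + j ≤ (fuel : Int) →
      pvMemoOK text.toList pattern.toList memo →
      (pvLcsMemo text pattern fuel i j memo).1
        = pvLcs text.toList pattern.toList i.toNat j.toNat
      ∧ pvMemoOK text.toList pattern.toList (pvLcsMemo text pattern fuel i j memo).2 := by
  intro fuel
  induction fuel with
  | zero =>
    intro i j memo hi hj hf hok
    rw [pvLcsMemo]
    by_cases h0 : (i == 0 || j == 0) = true
    · rw [if_pos h0]
      simp only [beq_iff_eq, Bool.or_eq_true] at h0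
      refine ⟨?_, hok⟩
      rcases h0 with h | h
      · subst h; rw [Int.toNat_zero, pvLcs_zero_left]
      · subst h; rw [Int.toNat_zero, pvLcs_zero_right]
    · simp only [beq_iff_eq, Bool.or_eq_true, not_or] at h0
      exfalso; omega
  | succ fuel ih =>
    intro i j memo hi hj hf hok
    rw [pvLcsMemo]
    by_cases h0 : (i == 0 || j == 0) = true
    · rw [if_pos h0]
      simp only [beq_iff_eq, Bool.or_eq_true] at h0
      refine ⟨?_, hok⟩
      rcases h0 with h | h
      · subst h; rw [Int.toNat_zero, pvLcs_zero_left]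
      · subst h; rw [Int.toNat_zero, pvLcs_zero_right]
    · rw [if_neg h0]
      simp only [beq_iff_eq, Bool.or_eq_true, not_or] at h0
      obtain ⟨a, ha⟩ : ∃ a : Nat, i = (a : Int) + 1 := ⟨(i - 1).toNat, by omega⟩
      obtain ⟨b, hb⟩ : ∃ b : Nat, j = (b : Int) + 1 := ⟨(j - 1).toNat, by omega⟩
      have hia : i.toNat = a + 1 := by omega
      have hjb : j.toNat = b + 1 := by omega
      have hia' : (i - 1).toNat = a := by omega
      have hjb' : (j - 1).toNat = b := by omega
      cases hget : PySem.Dict.get? memo (i, j) with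
      | some v =>
        refine ⟨?_, hok⟩
        exact hok _ (PySem.Dict.mem_items_of_get?_eq_some memo hget)
      | none =>
        have hch : PySem.Str.pyGet? text (i - 1) = text.toList[a]? := by
          rw [show i - 1 = ((a : Nat) : Int) by omega, PySem.Str.pyGet?_natCast]
        have hch' : PySem.Str.pyGet? pattern (j - 1) = pattern.toList[b]? := by
          rw [show j - 1 = ((b : Nat) : Int) by omega, PySem.Str.pyGet?_natCast]
        have hlcs : pvLcs text.toList pattern.toList i.toNat j.toNat
            = if text.toList[a]? == pattern.toList[b]?
              then 1 + pvLcs text.toList pattern.toList a b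
              else max (pvLcs text.toList pattern.toList a (b + 1))
                       (pvLcs text.toList pattern.toList (a + 1) b) := by
          rw [hia, hjb, pvLcs_succ_succ]
        by_cases hc : (PySem.Str.pyGet? text (i - 1) == PySem.Str.pyGet? pattern (j - 1)) = true
        · rw [if_pos hc]
          obtain ⟨h1, h2⟩ := ih (i - 1) (j - 1) memo (by omega) (by omega) (by omega) hok
          have hval : 1 + (pvLcsMemo text pattern fuel (i - 1) (j - 1) memo).1
              = pvLcs text.toList pattern.toList i.toNat j.toNat := by
            rw [h1, hia', hjb', hlcs, if_pos (by rw [← hch, ← hch']; exact hc)]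
          constructor
          · exact hval
          · intro kv hkv
            rcases (PySem.Dict.mem_items_insert _ _ _ _).1 hkv with hkv | ⟨hkv, _⟩
            · rw [hkv]; simpa using hval
            · exact h2 _ hkv
        · rw [if_neg hc]
          obtain ⟨h1, h2⟩ := ih (i - 1) j memo (by omega) hj (by omega) hok
          obtain ⟨h3, h4⟩ := ih i (j - 1) (pvLcsMemo text pattern fuel (i - 1) j memo).2
            hi (by omega) (by omega) h2
          have hval : max (pvLcsMemo text pattern fuel (i - 1) j memo).1
              (pvLcsMemo text pattern fuel i (j - 1)
                (pvLcsMemo text pattern fuel (i - 1) j memo).2).1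
              = pvLcs text.toList pattern.toList i.toNat j.toNat := by
            rw [h1, h3, hia', hjb', hia, hjb, pvLcs_succ_succ,
                if_neg (by rw [← hch, ← hch']; simpa using hc)]
          constructor
          · exact hval
          · intro kv hkv
            rcases (PySem.Dict.mem_items_insert _ _ _ _).1 hkv with hkv | ⟨hkv, _⟩
            · rw [hkv]; simpa using hval
            · exact h4 _ hkv

theorem b_main (text pattern : String) (N M : Nat) :
    minimumInsertions_alt text pattern (N : Int) (M : Int)
      = (N : Int) - pvLcs text.toList pattern.toList N M := by
  unfold minimumInsertions_alt
  have hok : pvMemoOK text.toList pattern.toList PySem.Dict.empty := by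
    intro kv hkv
    simp [PySem.Dict.empty] at hkv
  obtain ⟨h1, _⟩ := pvLcsMemo_correct text pattern (((N:Int) + (M:Int)).toNat)
    (N : Int) (M : Int) PySem.Dict.empty (by positivity) (by positivity) (by omega) hok
  rw [h1]
  simp

-- ===== VERDICT (by name: the statement is the Claim_ definition above) =====
theorem minimumInsertions_spec : Claim_equal_minimumInsertions := by
  intro text pattern n m _ hpre
  unfold Spec_minimumInsertions
  obtain ⟨hn, hm, -, -⟩ := hpre
  have hn' : n = ((n.toNat : Nat) : Int) := (Int.toNat_of_nonneg hn).symm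
  have hm' : m = ((m.toNat : Nat) : Int) := (Int.toNat_of_nonneg hm).symm
  rw [hn', hm', a_main, b_main]
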